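-- pv_equiv track=rewrite | github.com/pypi-data/pypi-mirror-403 | packages/trueform/trueform-0.3.0.tar.gz/trueform-0.3.0/python/tests/test_orient_faces_consistently.py | canonicalize_face
-- ===== SOURCE A (Python) =====
-- def canonicalize_face(face):
--     """Canonicalize a face for comparison (rotation and direction independent)."""
--     n = len(face)
--     # Find all rotations and both directions
--     candidates = []
--     for start in range(n):
--         # Forward
--         forward = tuple(face[(start + i) % n] for i in range(n))
--         candidates.append(forward)
--         # Reverse
--         reverse = tuple(face[(start - i) % n] for i in range(n))
--         candidates.append(reverse)
--     return min(candidates)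
-- ===== SOURCE B (Python) =====
-- def canonicalize_face(face):
--     """Canonicalize a face for comparison (rotation and direction independent)."""
--     n = len(face)
--     best = None
--     for seq in (face, face[::-1]):
--         m = min(seq)
--         doubled = seq + seq
--         for i in range(n):
--             if seq[i] == m:
--                 cand = tuple(doubled[i:i + n])
--                 if best is None or cand < best:
--                     best = cand
--     return best
-- ===== Notes on version B (the rewrite author's own statement) =====
-- stated objective: faster
-- what changed: Instead of materialising all 2n rotations (each built element-by-element with modular indexing) and taking min, B scans only the rotations that start at a position of the minimal element of the list (and of its reversal), slicing them out of a doubled list and keeping a running best.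
-- outside the precondition, e.g. on canonicalize_face([]): A raises ValueError, B raises ValueError
import Mathlib
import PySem

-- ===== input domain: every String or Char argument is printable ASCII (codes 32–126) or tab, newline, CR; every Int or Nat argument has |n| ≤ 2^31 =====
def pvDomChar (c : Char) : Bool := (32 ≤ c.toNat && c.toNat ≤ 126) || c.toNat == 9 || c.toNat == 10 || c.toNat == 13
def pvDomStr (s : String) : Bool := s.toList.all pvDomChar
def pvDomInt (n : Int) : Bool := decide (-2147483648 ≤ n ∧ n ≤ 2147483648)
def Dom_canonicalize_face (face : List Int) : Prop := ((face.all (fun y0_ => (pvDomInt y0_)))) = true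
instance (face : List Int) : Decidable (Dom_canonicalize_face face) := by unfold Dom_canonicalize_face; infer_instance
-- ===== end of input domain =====

-- B replaces A's enumeration of all 2n rotations with only the rotations that start at a position
-- of the minimal element (of the list and of its reversal); same result, usually far fewer candidates.

-- ===== PORT A =====
-- Literal port of A: build every forward and reverse rotation, take min.
-- face[(start±i) % n] is always in range for n > 0, so pyGetD's default 0 is never taken;
-- min([]) raises ValueError on face = [] — excluded by Pre_ — so .getD [] is never the default.
def canonicalize_face (face : List Int) : List Int :=
  let n := face.length
  let candidates := (List.range n).foldl (fun acc (start : Nat) =>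
    let forward := (List.range n).map (fun (i : Nat) =>
      PySem.List.pyGetD face (PySem.Int.mod ((start : Int) + (i : Int)) (n : Int)) 0)
    let reverse := (List.range n).map (fun (i : Nat) =>
      PySem.List.pyGetD face (PySem.Int.mod ((start : Int) - (i : Int)) (n : Int)) 0)
    (acc ++ [forward]) ++ [reverse]) []
  (PySem.List.min? candidates (fun x => x)).getD []

-- ===== PORT B =====
-- Literal port of B (Source B): for seq in (face, face[::-1]) keep, as candidates, only the rotations
-- doubled[i:i+n] that start where seq attains its minimum, tracking the best so far.
-- face[::-1] is List.reverse (PySem.List.slice?_none_none_neg_one); min(seq) raises on seq = []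
-- (excluded by Pre_), so .getD 0 / .getD [] are never the defaults.
def canonicalize_face_alt (face : List Int) : List Int :=
  let n := face.length
  let best := [face, face.reverse].foldl (fun best seq =>
    let m := (PySem.List.min? seq (fun x => x)).getD 0
    let doubled := seq ++ seq
    (List.range n).foldl (fun best (i : Nat) =>
      if PySem.List.pyGetD seq (i : Int) 0 = m then
        let cand := PySem.List.slice doubled (some (i : Int)) (some ((i : Int) + (n : Int)))
        match best with
        | none => some cand
        | some b => if cand < b then some cand else some b
      else best) best) none
  best.getD []

-- ===== PRECONDITION & SPEC =====
-- Pre_ excludes only face = [], on which A raises ValueError (min of an empty sequence).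
def Pre_canonicalize_face (face : List Int) : Prop := face ≠ []
instance (face : List Int) : Decidable (Pre_canonicalize_face face) := by
  unfold Pre_canonicalize_face; infer_instance
def pvWitness_canonicalize_face : List Int := [3, 1, 2]

def Spec_canonicalize_face (face : List Int) (out : List Int) : Prop := out = canonicalize_face_alt face
instance (face : List Int) (out : List Int) : Decidable (Spec_canonicalize_face face out) := by
  unfold Spec_canonicalize_face; infer_instance

-- ===== CLAIM (what is proved, stated in full; the proofs are below) =====
def Claim_equal_canonicalize_face : Prop := ∀ (face : List Int), Dom_canonicalize_face face → Pre_canonicalize_face face → Spec_canonicalize_face face (canonicalize_face face)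

-- ===== LEMMAS AND PROOFS =====

-- rotation of xs starting at index i
def pvRot (xs : List Int) (i : Nat) : List Int := xs.drop i ++ xs.take i

-- B's candidate list for one direction: rotations starting where the minimum value mv occurs
def pvCands (seq : List Int) (mv : Int) : List (List Int) :=
  ((List.range seq.length).filter (fun i => decide (seq.getD i 0 = mv))).map (fun i => pvRot seq i)

-- min? on List Int with the LinearOrder-derived DecidableLT (the library's order lemmas apply here)
def pvMin (cs : List (List Int)) : Option (List Int) :=
  @PySem.List.min? (List Int) (List Int) List.instLT
    (@LinearOrder.toDecidableLT _ List.instLinearOrder) cs (fun x => x)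

-- the port's min? (core Decidable instances) computes pvMin: the instances are subsingleton-equal
theorem min?_eq_pvMin (cs : List (List Int)) :
    PySem.List.min? cs (fun x => x) = pvMin cs := by
  unfold pvMin
  congr 1

theorem pvMin_eq_none_iff (cs : List (List Int)) : pvMin cs = none ↔ cs = [] := by
  unfold pvMin
  exact @PySem.List.min?_eq_none_iff _ _ _ (@LinearOrder.toDecidableLT _ List.instLinearOrder) cs (fun x => x)

theorem pvMin_mem {cs : List (List Int)} {m : List Int} (h : pvMin cs = some m) : m ∈ cs := by
  unfold pvMin at h
  exact @PySem.List.min?_mem _ _ List.instLT (@LinearOrder.toDecidableLT _ List.instLinearOrder) _ _ _ h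

theorem pvMin_isMin {cs : List (List Int)} {m : List Int} (h : pvMin cs = some m) :
    ∀ y ∈ cs, m ≤ y := by
  unfold pvMin at h; exact fun y hy => PySem.List.min?_isMin h y hy

theorem pvRot_length (xs : List Int) (i : Nat) : (pvRot xs i).length = xs.length := by
  simp [pvRot]; omega

theorem pvRot_cons (xs : List Int) (j : Nat) (h : j < xs.length) :
    pvRot xs j = xs[j] :: (xs.drop (j + 1) ++ xs.take j) := by
  unfold pvRot
  rw [List.drop_eq_getElem_cons h]
  rfl

theorem pymod_add (n s i : Nat) (hs : s < n) (hi : i < n) :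
    PySem.Int.mod ((s : Int) + (i : Int)) (n : Int)
      = if s + i < n then ((s + i : Nat) : Int) else ((s + i - n : Nat) : Int) := by
  rw [PySem.Int.mod_eq_emod_of_pos (by omega)]
  split_ifs with h
  · push_cast
    exact Int.emod_eq_of_lt (by omega) (by omega)
  · have h2 : ((s : Int) + (i : Int)) = ((s + i - n : Nat) : Int) + (n : Int) * 1 := by
      push_cast [Nat.cast_sub (show n ≤ s + i by omega)]; omega
    rw [h2, Int.add_mul_emod_self_left]
    exact Int.emod_eq_of_lt (by omega) (by omega)

theorem pymod_sub (n s i : Nat) (hs : s < n) (hi : i < n) :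
    PySem.Int.mod ((s : Int) - (i : Int)) (n : Int)
      = if i ≤ s then ((s - i : Nat) : Int) else ((n + s - i : Nat) : Int) := by
  rw [PySem.Int.mod_eq_emod_of_pos (by omega)]
  split_ifs with h
  · rw [show ((s : Int) - (i : Int)) = ((s - i : Nat) : Int) by push_cast [Nat.cast_sub h]; omega]
    exact Int.emod_eq_of_lt (by omega) (by omega)
  · have h2 : ((s : Int) - (i : Int)) = ((n + s - i : Nat) : Int) + (n : Int) * (-1) := by
      push_cast [Nat.cast_sub (show i ≤ n + s by omega)]; omega
    rw [h2, Int.add_mul_emod_self_left]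
    exact Int.emod_eq_of_lt (by omega) (by omega)

-- A's forward candidate at start s is the rotation of face at s
theorem forward_eq_rot (face : List Int) (s : Nat) (hs : s < face.length) :
    (List.range face.length).map (fun (i : Nat) =>
      PySem.List.pyGetD face (PySem.Int.mod ((s : Int) + (i : Int)) (face.length : Int)) 0)
      = pvRot face s := by
  apply List.ext_getElem
  · simp [pvRot_length]
  intro i h1 h2
  have hi : i < face.length := by simpa [pvRot_length] using h2
  simp only [List.getElem_map, List.getElem_range]
  rw [pymod_add face.length s i hs hi]
  have hlen : (face.drop s).length = face.length - s := by simp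
  split_ifs with h
  · rw [PySem.List.pyGetD_natCast, List.getD_eq_getElem _ _ (by omega)]
    unfold pvRot
    rw [List.getElem_append_left (by omega), List.getElem_drop]
  · rw [PySem.List.pyGetD_natCast, List.getD_eq_getElem _ _ (by omega)]
    unfold pvRot
    rw [List.getElem_append_right (by omega)]
    rw [List.getElem_take]
    simp only [show s + i - face.length = i - (face.drop s).length from by omega]

-- A's reverse candidate at start s is the rotation of face.reverse at n-1-s
theorem reverse_eq_rot (face : List Int) (s : Nat) (hs : s < face.length) :
    (List.range face.length).map (fun (i : Nat) =>
      PySem.List.pyGetD face (PySem.Int.mod ((s : Int) - (i : Int)) (face.length : Int)) 0)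
      = pvRot face.reverse (face.length - 1 - s) := by
  apply List.ext_getElem
  · simp [pvRot_length]
  intro i h1 h2
  have hi : i < face.length := by simpa [pvRot_length] using h2
  simp only [List.getElem_map, List.getElem_range]
  rw [pymod_sub face.length s i hs hi]
  have hlen : (face.reverse.drop (face.length - 1 - s)).length = s + 1 := by simp; omega
  split_ifs with h
  · rw [PySem.List.pyGetD_natCast, List.getD_eq_getElem _ _ (by omega)]
    unfold pvRot
    rw [List.getElem_append_left (by omega), List.getElem_drop, List.getElem_reverse]
    simp only [show face.length - 1 - (face.length - 1 - s + i) = s - i from by omega]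
  · rw [PySem.List.pyGetD_natCast, List.getD_eq_getElem _ _ (by omega)]
    unfold pvRot
    rw [List.getElem_append_right (by omega), List.getElem_take, List.getElem_reverse]
    simp only [show face.length - 1 - (i - (face.reverse.drop (face.length - 1 - s)).length) = face.length + s - i from by omega]

-- doubled-slice form of a rotation
theorem slice_doubled (seq : List Int) (i : Nat) (hi : i ≤ seq.length) :
    PySem.List.slice (seq ++ seq) (some (i : Int)) (some ((i : Int) + (seq.length : Int))) = pvRot seq i := by
  rw [PySem.List.slice_natCast_add, List.drop_append_of_le_length hi, List.take_append]
  unfold pvRot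
  congr 1
  · exact List.take_of_length_le (by simp)
  · congr 1; simp; omega

-- the fold step of B
def pvStep (b : Option (List Int)) (c : List Int) : Option (List Int) :=
  match b with
  | none => some c
  | some b => if c < b then some c else some b

theorem foldl_pvStep_eq_min? (cs : List (List Int)) :
    cs.foldl pvStep none = PySem.List.min? cs (fun x => x) := by
  unfold PySem.List.min?
  congr 1
  funext b c
  cases b with
  | none => rfl
  | some m => exact if_congr Iff.rfl rfl rfl

-- a guarded fold over indices is the fold over the filtered, mapped candidate list
theorem foldl_if_filter_map (l : List Nat) (p : Nat → Prop) [DecidablePred p] (f : Nat → List Int)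
    (g : Option (List Int) → List Int → Option (List Int)) (b0 : Option (List Int)) :
    l.foldl (fun b i => if p i then g b (f i) else b) b0
      = ((l.filter (fun i => decide (p i))).map f).foldl g b0 := by
  induction l generalizing b0 with
  | nil => rfl
  | cons x l ih =>
    by_cases h : p x <;> simp [h, ih]

-- min over a dominating sublist is the min over the whole list
theorem min?_eq_of_dominate (C D : List (List Int))
    (hsub : ∀ y ∈ D, y ∈ C) (hdom : ∀ x ∈ C, ∃ y ∈ D, y ≤ x) (hD : D ≠ []) :
    pvMin C = pvMin D := by
  have hC : C ≠ [] := by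
    cases D with
    | nil => exact absurd rfl hD
    | cons d D => intro h; subst h; exact absurd (hsub d (by simp)) (by simp)
  obtain ⟨a, ha⟩ : ∃ a, pvMin C = some a := by
    cases h : pvMin C with
    | none => exact absurd ((pvMin_eq_none_iff C).mp h) hC
    | some a => exact ⟨a, rfl⟩
  obtain ⟨b, hb⟩ : ∃ b, pvMin D = some b := by
    cases h : pvMin D with
    | none => exact absurd ((pvMin_eq_none_iff D).mp h) hD
    | some b => exact ⟨b, rfl⟩
  rw [ha, hb]
  have hab : a ≤ b := pvMin_isMin ha b (hsub b (pvMin_mem hb))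
  obtain ⟨y, hy, hya⟩ := hdom a (pvMin_mem ha)
  have hba : b ≤ a := le_trans (pvMin_isMin hb y hy) hya
  exact congrArg some (le_antisymm hab hba)

theorem mem_cands (seq : List Int) (mv : Int) {y : List Int} (hy : y ∈ pvCands seq mv) :
    ∃ i, i < seq.length ∧ y = pvRot seq i := by
  simp only [pvCands, List.mem_map, List.mem_filter, List.mem_range] at hy
  obtain ⟨i, ⟨hi, _⟩, hrot⟩ := hy
  exact ⟨i, hi, hrot.symm⟩

-- every rotation of seq is dominated by a rotation starting at a minimum position
theorem dominate_by_cands (seq : List Int) (mv : Int)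
    (hmv : PySem.List.min? seq (fun x => x) = some mv)
    (j : Nat) (hj : j < seq.length) :
    ∃ y ∈ pvCands seq mv, y ≤ pvRot seq j := by
  by_cases h : seq[j] = mv
  · refine ⟨pvRot seq j, ?_, le_refl _⟩
    simp only [pvCands, List.mem_map, List.mem_filter, List.mem_range]
    exact ⟨j, ⟨hj, by simp [List.getElem?_eq_getElem hj, h]⟩, rfl⟩
  · obtain ⟨i, hi, hiv⟩ := List.mem_iff_getElem.mp (PySem.List.min?_mem hmv)
    have hlt : mv < seq[j] := lt_of_le_of_ne (PySem.List.min?_isMin hmv _ (List.getElem_mem hj)) (fun he => h he.symm)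
    refine ⟨pvRot seq i, ?_, ?_⟩
    · simp only [pvCands, List.mem_map, List.mem_filter, List.mem_range]
      exact ⟨i, ⟨hi, by simp [List.getElem?_eq_getElem hi, hiv]⟩, rfl⟩
    · rw [pvRot_cons seq i hi, pvRot_cons seq j hj, hiv]
      exact le_of_lt (List.cons_lt_cons_iff.mpr (Or.inl hlt))

-- characterization of A as min over all rotations of face and of face.reverse
theorem portA_eq (face : List Int) :
    canonicalize_face face = (pvMin ((List.range face.length).flatMap (fun s =>
      [pvRot face s, pvRot face.reverse (face.length - 1 - s)]))).getD [] := by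
  unfold canonicalize_face
  show (PySem.List.min? ((List.range face.length).foldl (fun acc (start : Nat) =>
      (acc ++ [(List.range face.length).map (fun (i : Nat) =>
        PySem.List.pyGetD face (PySem.Int.mod ((start : Int) + (i : Int)) (face.length : Int)) 0)])
        ++ [(List.range face.length).map (fun (i : Nat) =>
        PySem.List.pyGetD face (PySem.Int.mod ((start : Int) - (i : Int)) (face.length : Int)) 0)]) [])
    (fun x => x)).getD []
    = (pvMin ((List.range face.length).flatMap (fun s =>
      [pvRot face s, pvRot face.reverse (face.length - 1 - s)]))).getD []
  rw [show (fun (acc : List (List Int)) (start : Nat) =>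
        (acc ++ [(List.range face.length).map (fun (i : Nat) =>
          PySem.List.pyGetD face (PySem.Int.mod ((start : Int) + (i : Int)) (face.length : Int)) 0)])
          ++ [(List.range face.length).map (fun (i : Nat) =>
          PySem.List.pyGetD face (PySem.Int.mod ((start : Int) - (i : Int)) (face.length : Int)) 0)])
      = (fun (acc : List (List Int)) (start : Nat) =>
        acc ++ [(List.range face.length).map (fun (i : Nat) =>
          PySem.List.pyGetD face (PySem.Int.mod ((start : Int) + (i : Int)) (face.length : Int)) 0),
          (List.range face.length).map (fun (i : Nat) =>
          PySem.List.pyGetD face (PySem.Int.mod ((start : Int) - (i : Int)) (face.length : Int)) 0)])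
      from by funext acc start; simp]
  rw [PySem.List.foldl_append_eq_flatMap, List.nil_append, min?_eq_pvMin]
  congr 2
  apply List.flatMap_congr  -- ∀ s ∈ range n, the two-element blocks agree
  intro s hsm
  have hs : s < face.length := List.mem_range.mp hsm
  rw [forward_eq_rot face s hs, reverse_eq_rot face s hs]

-- characterization of B as min over the pruned candidates
theorem portB_inner (seq : List Int) (n : Nat) (hn : seq.length = n) (mv : Int)
    (hmv : PySem.List.min? seq (fun x => x) = some mv) (b0 : Option (List Int)) :
    (List.range n).foldl (fun best (i : Nat) =>
      if PySem.List.pyGetD seq ((i : Nat) : Int) 0 = (PySem.List.min? seq (fun x => x)).getD 0 then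
        match best with
        | none => some (PySem.List.slice (seq ++ seq) (some ((i : Nat) : Int)) (some (((i : Nat) : Int) + (n : Int))))
        | some b => if PySem.List.slice (seq ++ seq) (some ((i : Nat) : Int)) (some (((i : Nat) : Int) + (n : Int))) < b then
            some (PySem.List.slice (seq ++ seq) (some ((i : Nat) : Int)) (some (((i : Nat) : Int) + (n : Int)))) else some b
      else best) b0
      = (pvCands seq mv).foldl pvStep b0 := by
  show (List.range n).foldl (fun best (i : Nat) =>
      if PySem.List.pyGetD seq ((i : Nat) : Int) 0 = (PySem.List.min? seq (fun x => x)).getD 0 then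
        pvStep best (PySem.List.slice (seq ++ seq) (some ((i : Nat) : Int)) (some (((i : Nat) : Int) + (n : Int))))
      else best) b0
      = (pvCands seq mv).foldl pvStep b0
  rw [foldl_if_filter_map (List.range n)
    (fun i => PySem.List.pyGetD seq ((i : Nat) : Int) 0 = (PySem.List.min? seq (fun x => x)).getD 0)
    (fun i => PySem.List.slice (seq ++ seq) (some ((i : Nat) : Int)) (some (((i : Nat) : Int) + (n : Int))))]
  subst hn
  unfold pvCands
  congr 1
  have hfilter : List.filter (fun i => decide
        (PySem.List.pyGetD seq ((i : Nat) : Int) 0 = (PySem.List.min? seq (fun x => x)).getD 0))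
        (List.range seq.length)
      = List.filter (fun i => decide (seq.getD i 0 = mv)) (List.range seq.length) := by
    apply List.filter_congr
    intro i him
    have hi : i < seq.length := List.mem_range.mp him
    rw [hmv, PySem.List.pyGetD_natCast]
    rfl
  rw [hfilter]
  apply List.map_congr_left
  intro i him
  have hi : i < seq.length := List.mem_range.mp (List.mem_filter.mp him).1
  exact slice_doubled seq i (le_of_lt hi)

theorem portB_eq (face : List Int) (mv1 mv2 : Int)
    (h1 : PySem.List.min? face (fun x => x) = some mv1)
    (h2 : PySem.List.min? face.reverse (fun x => x) = some mv2) :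
    canonicalize_face_alt face = (pvMin (pvCands face mv1 ++ pvCands face.reverse mv2)).getD [] := by
  unfold canonicalize_face_alt
  show ([face, face.reverse].foldl (fun best seq =>
      (List.range face.length).foldl (fun best (i : Nat) =>
        if PySem.List.pyGetD seq ((i : Nat) : Int) 0 = (PySem.List.min? seq (fun x => x)).getD 0 then
          match best with
          | none => some (PySem.List.slice (seq ++ seq) (some ((i : Nat) : Int)) (some (((i : Nat) : Int) + (face.length : Int))))
          | some b => if PySem.List.slice (seq ++ seq) (some ((i : Nat) : Int)) (some (((i : Nat) : Int) + (face.length : Int))) < b then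
              some (PySem.List.slice (seq ++ seq) (some ((i : Nat) : Int)) (some (((i : Nat) : Int) + (face.length : Int)))) else some b
        else best) best) none).getD []
    = (pvMin (pvCands face mv1 ++ pvCands face.reverse mv2)).getD []
  simp only [List.foldl_cons, List.foldl_nil]
  rw [portB_inner face face.length rfl mv1 h1,
      portB_inner face.reverse face.length (List.length_reverse) mv2 h2,
      ← List.foldl_append]
  rw [foldl_pvStep_eq_min?, min?_eq_pvMin]

-- ===== VERDICT (by name: the statement is the Claim_ definition above) =====
theorem canonicalize_face_spec : Claim_equal_canonicalize_face := by
  intro face _ hpre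
  unfold Spec_canonicalize_face
  have hne : face ≠ [] := hpre
  have hrne : face.reverse ≠ [] := by simpa using hne
  obtain ⟨mv1, h1⟩ : ∃ m, PySem.List.min? face (fun x => x) = some m := by
    cases h : PySem.List.min? face (fun x => x) with
    | none => exact absurd ((PySem.List.min?_eq_none_iff face _).mp h) hne
    | some m => exact ⟨m, rfl⟩
  obtain ⟨mv2, h2⟩ : ∃ m, PySem.List.min? face.reverse (fun x => x) = some m := by
    cases h : PySem.List.min? face.reverse (fun x => x) with
    | none => exact absurd ((PySem.List.min?_eq_none_iff face.reverse _).mp h) hrne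
    | some m => exact ⟨m, rfl⟩
  rw [portA_eq face, portB_eq face mv1 mv2 h1 h2]
  congr 1
  apply min?_eq_of_dominate
  · -- every pruned candidate is one of A's candidates
    intro y hy
    rcases List.mem_append.mp hy with hy | hy
    · obtain ⟨i, hi, rfl⟩ := mem_cands face mv1 hy
      exact List.mem_flatMap.mpr ⟨i, List.mem_range.mpr hi, by simp⟩
    · obtain ⟨i, hi, rfl⟩ := mem_cands face.reverse mv2 hy
      have hi' : i < face.length := by simpa using hi
      refine List.mem_flatMap.mpr ⟨face.length - 1 - i, List.mem_range.mpr (by omega), ?_⟩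
      have : face.length - 1 - (face.length - 1 - i) = i := by omega
      rw [this]
      simp
  · -- every candidate of A is dominated by a pruned candidate
    intro x hx
    obtain ⟨s, hsm, hxm⟩ := List.mem_flatMap.mp hx
    have hs : s < face.length := List.mem_range.mp hsm
    rcases List.mem_pair.mp hxm with rfl | rfl
    · obtain ⟨y, hy, hle⟩ := dominate_by_cands face mv1 h1 s hs
      exact ⟨y, List.mem_append_left _ hy, hle⟩
    · have hs' : face.length - 1 - s < face.reverse.length := by simp; omega
      obtain ⟨y, hy, hle⟩ := dominate_by_cands face.reverse mv2 h2 _ hs'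
      exact ⟨y, List.mem_append_right _ hy, hle⟩
  · -- the pruned list is nonempty: the minimum occurs somewhere
    obtain ⟨i, hi, hiv⟩ := List.mem_iff_getElem.mp (PySem.List.min?_mem h1)
    have : pvRot face i ∈ pvCands face mv1 := by
      simp only [pvCands, List.mem_map, List.mem_filter, List.mem_range]
      exact ⟨i, ⟨hi, by simp [List.getElem?_eq_getElem hi, hiv]⟩, rfl⟩
    intro hcon
    rw [List.append_eq_nil_iff] at hcon
    rw [hcon.1] at this
    exact absurd this (List.not_mem_nil)
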